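-- pv_equiv track=rewrite | github.com/openswarm-ai/openswarm | linter/checks/endpoints.py | _static_tail
-- ===== SOURCE A (Python) =====
-- def _static_tail(route_path: str) -> str:
--     """Return the trailing contiguous static segments of a route path.
--
--     >>> _static_tail("/sessions/{id}/message")
--     '/message'
--     >>> _static_tail("/usage-summary")
--     '/usage-summary'
--     >>> _static_tail("/{id}")
--     ''
--     """
--     parts = route_path.strip("/").split("/")
--     tail: list[str] = []
--     for part in reversed(parts):
--         if part.startswith("{"):
--             break
--         tail.append(part)
--     tail.reverse()
--     return "/" + "/".join(tail) if tail else ""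
-- ===== SOURCE B (Python) =====
-- def _static_tail(route_path: str) -> str:
--     parts = route_path.strip("/").split("/")
--     cut = 0
--     for i, part in enumerate(parts):
--         if part.startswith("{"):
--             cut = i + 1
--     tail = parts[cut:]
--     return "/" + "/".join(tail) if tail else ""
-- ===== Notes on version B (the rewrite author's own statement) =====
-- stated objective: alternative
-- what changed: B makes a single forward pass maintaining the index just past the last dynamic (brace-prefixed) segment and slices the tail, instead of A's reverse scan with early break, accumulator and final reversal.
import Mathlib
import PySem

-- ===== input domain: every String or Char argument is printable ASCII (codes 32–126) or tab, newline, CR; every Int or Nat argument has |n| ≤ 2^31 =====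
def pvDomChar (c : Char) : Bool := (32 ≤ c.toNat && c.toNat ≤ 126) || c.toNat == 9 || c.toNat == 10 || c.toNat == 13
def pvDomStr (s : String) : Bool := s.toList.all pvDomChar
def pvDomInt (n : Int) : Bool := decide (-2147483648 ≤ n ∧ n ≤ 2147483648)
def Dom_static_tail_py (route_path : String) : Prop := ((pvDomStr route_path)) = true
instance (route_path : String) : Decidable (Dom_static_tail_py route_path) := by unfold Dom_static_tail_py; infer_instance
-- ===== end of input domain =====

-- B replaces A's reverse scan/break/accumulate/reverse with one forward pass keeping the
-- index past the last dynamic (brace-prefixed) segment, then a slice (alternative decomposition).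

-- ===== PORT A =====
-- 'for part in reversed(parts): if part.startswith("{"): break; tail.append(part)'
def static_tail_loopA : List String → List String → List String
  | [], tail => tail
  | p :: rest, tail =>
      if PySem.Str.startswith p "{" then tail
      else static_tail_loopA rest (tail ++ [p])

def static_tail_py (route_path : String) : String :=
  let parts := (PySem.Str.split? (PySem.Str.stripChars route_path "/") "/").getD []  -- sep "/" ≠ "", so split? is some
  let tail := static_tail_loopA parts.reverse []
  let tail := tail.reverse
  if tail ≠ [] then "/" ++ PySem.Str.join "/" tail else ""

-- ===== PORT B =====
def static_tail_py_alt (route_path : String) : String :=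
  let parts := (PySem.Str.split? (PySem.Str.stripChars route_path "/") "/").getD []  -- sep "/" ≠ "", so split? is some
  let cut : Int := (PySem.List.enumerate parts 0).foldl
      (fun cut ip => if PySem.Str.startswith ip.2 "{" then ip.1 + 1 else cut) 0
  let tail := PySem.List.slice parts (some cut) none
  if tail ≠ [] then "/" ++ PySem.Str.join "/" tail else ""

-- ===== PRECONDITION & SPEC =====
def Spec_static_tail_py (route_path : String) (out : String) : Prop := out = static_tail_py_alt route_path
instance (route_path : String) (out : String) : Decidable (Spec_static_tail_py route_path out) := by unfold Spec_static_tail_py; infer_instance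

-- ===== CLAIM (what is proved, stated in full; the proofs are below) =====
def Claim_equal_static_tail_py : Prop := ∀ (route_path : String), Dom_static_tail_py route_path → Spec_static_tail_py route_path (static_tail_py route_path)

-- ===== LEMMAS AND PROOFS =====

-- A's loop collects the longest prefix of its (reversed) input made of non-'{' parts.
theorem static_tail_loopA_eq (l acc : List String) :
    static_tail_loopA l acc = acc ++ l.takeWhile (fun p => !PySem.Str.startswith p "{") := by
  induction l generalizing acc with
  | nil => simp [static_tail_loopA]
  | cons p rest ih =>
      simp only [static_tail_loopA, List.takeWhile_cons]
      by_cases h : PySem.Str.startswith p "{" = true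
      · simp at h; simp [h]
      · simp only [Bool.not_eq_true] at h
        simp at h; simp [h, ih]

-- B's fold computes the length of the part of parts.reverse starting at the last '{'-part.
theorem static_tail_cut_eq (ps : List String) :
    (PySem.List.enumerate ps 0).foldl
      (fun cut ip => if PySem.Str.startswith ip.2 "{" then ip.1 + 1 else cut) 0
    = ((ps.reverse.dropWhile (fun p => !PySem.Str.startswith p "{")).length : Int) := by
  induction ps using List.reverseRecOn with
  | nil => simp
  | append_singleton qs p ih =>
      rw [PySem.List.enumerate_append, List.foldl_append, ih]
      by_cases h : PySem.Str.startswith p "{" = true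
      · simp at h
        simp [PySem.List.enumerate_cons, PySem.List.enumerate_nil, h, ]
      · simp only [Bool.not_eq_true] at h
        simp at h
        simp [PySem.List.enumerate_cons, PySem.List.enumerate_nil, h, ]

-- The tails agree: A's reversed accumulator equals B's slice.
theorem static_tail_tails_eq (ps : List String) :
    (static_tail_loopA ps.reverse []).reverse
    = PySem.List.slice ps
        (some ((PySem.List.enumerate ps 0).foldl
          (fun cut ip => if PySem.Str.startswith ip.2 "{" then ip.1 + 1 else cut) 0)) none := by
  rw [static_tail_cut_eq, PySem.List.slice_from_natCast, static_tail_loopA_eq]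
  set g : String → Bool := fun p => !PySem.Str.startswith p "{" with hg
  set t := List.takeWhile g ps.reverse with ht
  set d := List.dropWhile g ps.reverse with hd
  have hsplit : ps = d.reverse ++ t.reverse := by
    rw [hd, ht, ← List.reverse_append, List.takeWhile_append_dropWhile, List.reverse_reverse]
  rw [hsplit, show d.length = d.reverse.length from (List.length_reverse (as := d)).symm,
      List.drop_left]
  simp

-- ===== VERDICT (by name: the statement is the Claim_ definition above) =====
theorem static_tail_py_spec : Claim_equal_static_tail_py := by
  intro route_path _
  unfold Spec_static_tail_py static_tail_py static_tail_py_alt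
  simp only
  rw [static_tail_tails_eq]
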